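-- pv_equiv track=rewrite | github.com/OleksandrSelehei/AcademicCryptography | EDS_with_RSA.py | EDS_verification
-- ===== SOURCE A (Python) =====
-- def EDS_verification(s, e, n, text, h_0):
--     h = h_0
--     text = list(map(int, str(text)))
--     for element in text:
--         h = ((element + h) ** 2) % n
--     m = (s ** e) % n
--     if m == h:
--         return True
--     else:
--         return False
-- ===== SOURCE B (Python) =====
-- def EDS_verification(s, e, n, text, h_0):
--     def hash_digits(t, h):
--         q, d = divmod(t, 10)
--         if q:
--             h = hash_digits(q, h)
--         return ((d + h) ** 2) % n
--     return pow(s, e, n) == hash_digits(text, h_0)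
-- ===== Notes on version B (the rewrite author's own statement) =====
-- stated objective: faster
-- what changed: B replaces (s**e)%n by built-in modular exponentiation pow(s,e,n) and computes the squaring hash by arithmetic recursion on the number (divmod by 10) instead of converting the number to a string and folding over its characters.
-- outside the precondition, e.g. on EDS_verification(2, -1, 4, 1, 0): A returns False, B raises ValueError
import Mathlib
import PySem

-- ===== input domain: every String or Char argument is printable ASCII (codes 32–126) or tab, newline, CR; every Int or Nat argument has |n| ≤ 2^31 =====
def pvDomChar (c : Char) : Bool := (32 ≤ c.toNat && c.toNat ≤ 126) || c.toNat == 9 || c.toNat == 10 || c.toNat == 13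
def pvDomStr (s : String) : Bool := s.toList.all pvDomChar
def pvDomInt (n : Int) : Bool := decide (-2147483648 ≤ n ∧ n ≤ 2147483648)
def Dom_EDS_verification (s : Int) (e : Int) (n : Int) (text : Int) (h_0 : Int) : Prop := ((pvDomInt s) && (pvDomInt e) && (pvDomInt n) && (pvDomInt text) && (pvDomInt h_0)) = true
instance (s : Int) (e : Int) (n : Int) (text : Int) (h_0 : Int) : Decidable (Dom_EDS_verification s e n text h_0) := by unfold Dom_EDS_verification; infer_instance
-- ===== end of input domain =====

-- B replaces the full-size exponentiation (s**e)%n by modular exponentiation pow(s,e,n) and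
-- computes the squaring hash by divmod recursion on the number instead of folding over str(text).

-- ===== PORT A =====
-- str(text) → digits via int() of each one-character string; getD 0 is unreachable under Pre_
-- (text ≥ 0, so every character is a decimal digit and int() succeeds).
def EDS_verification (s : Int) (e : Int) (n : Int) (text : Int) (h_0 : Int) : Bool :=
  let digits : List Int :=
    (PySem.Int.toStr text).toList.map (fun c => (PySem.Int.ofChars? [c]).getD 0)
  let h : Int := digits.foldl (fun h element => PySem.Int.mod ((element + h) ^ 2) n) h_0
  -- s ** e: exact for e ≥ 0 (Pre_); Python's float path for e < 0 is excluded by Pre_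
  let m : Int := PySem.Int.mod (s ^ e.toNat) n
  decide (m = h)

-- ===== PORT B =====
-- hash_digits from Source B: recursion on the number itself (t ≥ 0 under Pre_, hence the Nat argument)
def hashDigits (n : Int) (t : Nat) (h : Int) : Int :=
  let q := t / 10
  let d := t % 10
  let h' := if q ≠ 0 then hashDigits n q h else h
  PySem.Int.mod (((d : Int) + h') ^ 2) n
termination_by t
decreasing_by
  have ht : t ≠ 0 := by rintro rfl; simp at *; omega
  exact Nat.div_lt_self (Nat.pos_of_ne_zero ht) (by norm_num)

-- pow(s, e, n): built-in three-argument pow, ported by its contract (exact for e ≥ 0, n ≠ 0)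
def pyPow3 (b : Int) (e : Int) (m : Int) : Int := PySem.Int.mod (b ^ e.toNat) m

def EDS_verification_alt (s : Int) (e : Int) (n : Int) (text : Int) (h_0 : Int) : Bool :=
  decide (pyPow3 s e n = hashDigits n text.toNat h_0)

-- ===== PRECONDITION & SPEC =====
-- Pre_ excludes n = 0 (ZeroDivisionError) and text < 0 (int('-') ValueError), where A raises,
-- and e < 0, where Python computes s ** e as a float (not an int of the declared type;
-- for s = 0 it raises ZeroDivisionError) — see the cite in the claim.
def Pre_EDS_verification (s : Int) (e : Int) (n : Int) (text : Int) (h_0 : Int) : Prop :=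
  0 ≤ e ∧ n ≠ 0 ∧ 0 ≤ text
instance (s : Int) (e : Int) (n : Int) (text : Int) (h_0 : Int) : Decidable (Pre_EDS_verification s e n text h_0) := by unfold Pre_EDS_verification; infer_instance

def pvWitness_EDS_verification : Int × Int × Int × Int × Int := (2, 3, 5, 123, 1)

def Spec_EDS_verification (s : Int) (e : Int) (n : Int) (text : Int) (h_0 : Int) (out : Bool) : Prop := out = EDS_verification_alt s e n text h_0
instance (s : Int) (e : Int) (n : Int) (text : Int) (h_0 : Int) (out : Bool) : Decidable (Spec_EDS_verification s e n text h_0 out) := by unfold Spec_EDS_verification; infer_instance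

-- ===== CLAIM (what is proved, stated in full; the proofs are below) =====
def Claim_equal_EDS_verification : Prop := ∀ (s : Int) (e : Int) (n : Int) (text : Int) (h_0 : Int), Dom_EDS_verification s e n text h_0 → Pre_EDS_verification s e n text h_0 → Spec_EDS_verification s e n text h_0 (EDS_verification s e n text h_0)

-- ===== LEMMAS AND PROOFS =====

-- fuel irrelevance for Nat.toDigitsCore once the fuel exceeds the number
lemma toDigitsCore_fuel (b : Nat) (hb : 2 ≤ b) :
    ∀ n, ∀ f f' : Nat, n < f → n < f' → ∀ acc,
      Nat.toDigitsCore b f n acc = Nat.toDigitsCore b f' n acc := by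
  intro n
  induction n using Nat.strong_induction_on with
  | _ n ih =>
    intro f f' hf hf' acc
    match f, f' with
    | f + 1, f' + 1 =>
      simp only [Nat.toDigitsCore]
      by_cases h : n / b = 0
      · simp [h]
      · simp only [h, if_false]
        have hn : 0 < n := by
          rcases Nat.eq_zero_or_pos n with h0 | h0
          · subst h0; simp at h
          · exact h0
        have hlt : n / b < n := Nat.div_lt_self hn (by omega)
        exact ih (n / b) hlt f f' (by omega) (by omega) _

lemma toDigitsCore_acc (b : Nat) :
    ∀ f n acc, Nat.toDigitsCore b f n acc = Nat.toDigitsCore b f n [] ++ acc := by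
  intro f
  induction f with
  | zero => simp [Nat.toDigitsCore]
  | succ f ih =>
    intro n acc
    simp only [Nat.toDigitsCore]
    by_cases h : n / b = 0
    · simp [h]
    · simp only [h, if_false]
      rw [ih (n / b) [Nat.digitChar (n % b)], ih (n / b) (Nat.digitChar (n % b) :: acc)]
      simp

lemma toDigits_lt (t : Nat) (h : t < 10) : Nat.toDigits 10 t = [Nat.digitChar t] := by
  unfold Nat.toDigits
  simp [Nat.toDigitsCore, Nat.div_eq_of_lt h, Nat.mod_eq_of_lt h]

lemma toDigits_ge (t : Nat) (h : 10 ≤ t) :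
    Nat.toDigits 10 t = Nat.toDigits 10 (t / 10) ++ [Nat.digitChar (t % 10)] := by
  unfold Nat.toDigits
  have hq : t / 10 ≠ 0 := by
    have := Nat.le_div_iff_mul_le (k := 10) (by omega) (x := t) (y := 1)
    omega
  simp only [Nat.toDigitsCore, hq, if_false]
  rw [toDigitsCore_acc]
  congr 1
  exact toDigitsCore_fuel 10 (by norm_num) (t / 10) t (t / 10 + 1)
    (Nat.div_lt_self (by omega) (by norm_num))
    (by omega) []

-- int() of a single digit character
lemma ofChars_digitChar (d : Nat) (hd : d < 10) :
    (PySem.Int.ofChars? [Nat.digitChar d]).getD 0 = (d : Int) := by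
  interval_cases d <;> decide

-- the key lemma: A's fold over the decimal string equals B's divmod recursion
lemma fold_eq_hashDigits (n : Int) (t : Nat) (h : Int) :
    ((Nat.toDigits 10 t).map (fun c => (PySem.Int.ofChars? [c]).getD 0)).foldl
        (fun h element => PySem.Int.mod ((element + h) ^ 2) n) h
      = hashDigits n t h := by
  induction t using Nat.strong_induction_on generalizing h with
  | _ t ih =>
    by_cases ht : t < 10
    · rw [toDigits_lt t ht, hashDigits]
      have hq : t / 10 = 0 := Nat.div_eq_of_lt ht
      have hm : t % 10 = t := Nat.mod_eq_of_lt ht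
      simp [ofChars_digitChar t ht, hq, hm]
    · rw [toDigits_ge t (by omega), hashDigits]
      have hq : t / 10 ≠ 0 := by
        have := Nat.le_div_iff_mul_le (k := 10) (by omega) (x := t) (y := 1)
        omega
      simp only [List.map_append, List.foldl_append, List.map_cons, List.map_nil,
        List.foldl_cons, List.foldl_nil,
        ofChars_digitChar (t % 10) (Nat.mod_lt t (by omega)), hq, ne_eq,
        not_false_eq_true, if_pos]
      rw [ih (t / 10) (Nat.div_lt_self (by omega) (by norm_num)) h]

-- ===== VERDICT (by name: the statement is the Claim_ definition above) =====
theorem EDS_verification_spec : Claim_equal_EDS_verification := by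
  intro s e n text h_0 _ hpre
  obtain ⟨he, hn, htext⟩ := hpre
  show EDS_verification s e n text h_0 = EDS_verification_alt s e n text h_0
  unfold EDS_verification EDS_verification_alt pyPow3
  simp only [PySem.Int.toList_toStr]
  have htc : PySem.Int.toChars text = Nat.toDigits 10 text.toNat := by
    unfold PySem.Int.toChars
    rw [if_neg (by omega)]
  rw [htc, fold_eq_hashDigits]
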